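-- pv_equiv track=rewrite | github.com/wisecashew/suite | py_analysis/phase-behavior/spinodal_plotter.py | good_transitions
-- ===== SOURCE A (Python) =====
-- def good_transitions (arr):
--
--     positive = arr[0] > 0
--
--     if positive:
--         pass
--     else:
--         return False
--
--     transition = 0
--     for i in range(1, len(arr)):
--         current_positive = arr[i] > 0
--
--         if current_positive != positive:
--             transition += 1
--
--         positive = current_positive
--
--     if transition >= 2:
--         return True
--     else:
--         return False
-- ===== SOURCE B (Python) =====
-- def good_transitions(arr):
--     # Since the array must start positive, ">=2 sign transitions" holds exactly
--     # when some non-positive element is later followed by a positive one.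
--     if arr[0] <= 0:
--         return False
--     for i, x in enumerate(arr):
--         if x <= 0:
--             return any(y > 0 for y in arr[i+1:])
--     return False
-- ===== Notes on version B (the rewrite author's own statement) =====
-- stated objective: simpler
-- what changed: Replaces the running adjacent-comparison transition counter with a staged search: since the array must start positive, >=2 transitions holds iff some non-positive element is later followed by a positive one, so B finds the first non-positive element and then just scans the rest for a positive, with early exit and no counter.
import Mathlib
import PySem

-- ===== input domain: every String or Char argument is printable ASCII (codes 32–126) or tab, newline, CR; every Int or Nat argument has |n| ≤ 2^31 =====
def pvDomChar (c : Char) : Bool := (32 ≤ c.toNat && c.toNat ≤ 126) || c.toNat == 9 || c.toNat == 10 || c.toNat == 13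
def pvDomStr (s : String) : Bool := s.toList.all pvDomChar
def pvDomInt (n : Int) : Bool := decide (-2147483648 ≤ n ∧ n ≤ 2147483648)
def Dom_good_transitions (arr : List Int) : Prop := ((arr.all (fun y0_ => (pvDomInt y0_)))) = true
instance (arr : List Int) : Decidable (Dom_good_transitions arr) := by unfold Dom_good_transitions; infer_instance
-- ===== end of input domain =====

-- B drops A's running transition counter: starting positive, >=2 transitions holds iff
-- some non-positive element is later followed by a positive one (objective: simpler).

-- ===== PORT A =====
def good_transitions (arr : List Int) : Bool :=
  match arr with
  | [] => false  -- unreachable under Pre_: Python A raises IndexError reading the first element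
  | a0 :: rest =>
    let positive := decide (a0 > 0)
    if positive then
      -- for i in range(1, len(arr)): fold over the remaining elements with state (transition, positive)
      let st := rest.foldl
        (fun (st : Int × Bool) x =>
          let cur := decide (x > 0)
          (if cur ≠ st.2 then st.1 + 1 else st.1, cur))
        ((0 : Int), positive)
      decide (st.1 ≥ 2)
    else false

-- ===== PORT B =====
-- the 'for i, x in enumerate(arr): if x <= 0: return any(y > 0 for y in arr[i+1:])' loop:
-- at the first non-positive element the remaining suffix is exactly the tail at that point.
def findDip : List Int → Bool
  | [] => false
  | x :: rest => if x ≤ 0 then rest.any (fun y => decide (y > 0)) else findDip rest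

def good_transitions_alt (arr : List Int) : Bool :=
  match arr with
  | [] => false  -- unreachable under Pre_: Python B raises IndexError reading the first element
  | a0 :: _ =>
    if a0 ≤ 0 then false
    else findDip arr

-- ===== PRECONDITION & SPEC =====
-- Pre_ excludes only the empty list, on which both Pythons raise IndexError reading the first element.
def Pre_good_transitions (arr : List Int) : Prop := arr ≠ []
instance (arr : List Int) : Decidable (Pre_good_transitions arr) := by unfold Pre_good_transitions; infer_instance
def pvWitness_good_transitions : List Int := [1, -1, 1]
def Spec_good_transitions (arr : List Int) (out : Bool) : Prop := out = good_transitions_alt arr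
instance (arr : List Int) (out : Bool) : Decidable (Spec_good_transitions arr out) := by unfold Spec_good_transitions; infer_instance

-- ===== CLAIM =====
def Claim_equal_good_transitions : Prop := ∀ (arr : List Int), Dom_good_transitions arr → Pre_good_transitions arr → Spec_good_transitions arr (good_transitions arr)

-- ===== LEMMAS AND PROOFS =====

-- the number of key changes along b :: (keys of l)
def chg : Bool → List Int → Int
  | _, [] => 0
  | b, x :: l => (if decide (x > 0) ≠ b then 1 else 0) + chg (decide (x > 0)) l

theorem chg_nonneg : ∀ (l : List Int) (b : Bool), 0 ≤ chg b l := by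
  intro l
  induction l with
  | nil => intro b; simp [chg]
  | cons x l ih =>
    intro b
    have := ih (decide (x > 0))
    simp only [chg]
    split <;> omega

theorem foldl_eq_chg (l : List Int) :
    ∀ (t : Int) (b : Bool),
    (l.foldl
      (fun (st : Int × Bool) x =>
        let cur := decide (x > 0)
        (if cur ≠ st.2 then st.1 + 1 else st.1, cur))
      (t, b)).1 = t + chg b l := by
  induction l with
  | nil => intro t b; simp [chg]
  | cons x l ih =>
    intro t b
    rw [List.foldl_cons]
    refine Eq.trans (ih _ _) ?_
    simp only [chg]
    by_cases hx : decide (x > 0) ≠ b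
    · rw [if_pos hx, if_pos hx]; omega
    · rw [if_neg hx, if_neg hx]; omega

-- starting from key 'false', at least one change iff some later element is positive
theorem chg_false_ge_one (l : List Int) :
    chg false l ≥ 1 ↔ l.any (fun y => decide (y > 0)) = true := by
  induction l with
  | nil => simp [chg]
  | cons x l ih =>
    simp only [chg, List.any_cons]
    by_cases h : x > 0
    · have := chg_nonneg l true
      simp only [decide_eq_true h, Bool.true_or]
      rw [if_pos (by decide : (true:Bool) ≠ false)]
      constructor
      · intro _; trivial
      · intro _; omega
    · simp only [decide_eq_false h]
      simpa using ih

-- starting from key 'true', at least two changes iff a non-positive element is later followed by a positive one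
theorem chg_true_ge_two (l : List Int) :
    chg true l ≥ 2 ↔ findDip l = true := by
  induction l with
  | nil => simp [chg, findDip]
  | cons x l ih =>
    simp only [chg, findDip]
    by_cases h : x > 0
    · simp only [decide_eq_true h, if_neg (not_le.mpr h)]
      simpa using ih
    · have h2 := chg_false_ge_one l
      simp only [decide_eq_false h, if_pos (not_lt.mp h)]
      rw [if_pos Bool.false_ne_true]
      simp only [ge_iff_le] at *
      constructor
      · intro hc; exact h2.mp (by omega)
      · intro hc; have := h2.mpr hc; omega

theorem good_transitions_spec : Claim_equal_good_transitions := by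
  intro arr _ hpre
  unfold Spec_good_transitions
  match arr with
  | [] => exact absurd rfl hpre
  | a0 :: rest =>
    simp only [good_transitions, good_transitions_alt]
    by_cases h : a0 > 0
    · simp only [decide_eq_true h, if_true, if_neg (not_le.mpr h)]
      rw [foldl_eq_chg]
      simp only [findDip, if_neg (not_le.mpr h)]
      have hiff := chg_true_ge_two rest
      by_cases h2 : chg true rest ≥ 2
      · rw [decide_eq_true (by omega : (0:Int) + chg true rest ≥ 2), hiff.mp h2]
      · rw [decide_eq_false (by omega : ¬ ((0:Int) + chg true rest ≥ 2))]
        exact (Bool.eq_false_iff.mpr (fun hc => h2 (hiff.mpr hc))).symm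
    · simp [decide_eq_false h, if_pos (not_lt.mp h)]
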